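-- pv_equiv track=rewrite | github.com/zia207/Survival_Analysis_R | rmd_to_colab_01.py | split_markdown_into_heading_cells
-- ===== SOURCE A (Python) =====
-- def is_heading_line(line: str) -> bool:
--     """Check if line is a Markdown heading (atx style: # Heading)."""
--     stripped = line.lstrip()
--     if not stripped.startswith("#"):
--         return False
--     # Must have a space after #s or end of line (valid heading)
--     after_hash = stripped.lstrip("#")
--     return after_hash.startswith(" ") or after_hash == ""
--
-- def split_markdown_into_heading_cells(md_lines):
--     """Split a list of Markdown lines into cells, isolating each heading into its own cell."""
--     cells = []
--     current_block = []
--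
--     for line in md_lines:
--         if is_heading_line(line):
--             # Flush current block if not empty
--             if current_block:
--                 cells.append("\n".join(current_block))
--                 current_block = []
--             # Add heading as its own cell
--             cells.append(line)
--         else:
--             current_block.append(line)
--
--     # Flush remaining
--     if current_block:
--         cells.append("\n".join(current_block))
--
--     return cells
-- ===== SOURCE B (Python) =====
-- def is_heading_line(line: str) -> bool:
--     """Check if line is a Markdown heading (atx style: # Heading)."""
--     stripped = line.lstrip()
--     if not stripped.startswith("#"):
--         return False
--     after_hash = stripped.lstrip("#")
--     return after_hash.startswith(" ") or after_hash == ""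
--
-- def split_markdown_into_heading_cells(md_lines):
--     """Two-pointer run scan: each heading is its own cell; each maximal
--     run of non-heading lines is joined into one cell."""
--     cells = []
--     i = 0
--     n = len(md_lines)
--     while i < n:
--         if is_heading_line(md_lines[i]):
--             cells.append(md_lines[i])
--             i += 1
--         else:
--             j = i + 1
--             while j < n and not is_heading_line(md_lines[j]):
--                 j += 1
--             cells.append("\n".join(md_lines[i:j]))
--             i = j
--     return cells
-- ===== Notes on version B (the rewrite author's own statement) =====
-- stated objective: alternative
-- what changed: Replaces A's accumulate-and-flush-on-boundary loop (mutable current_block flushed whenever a heading appears) with a two-pointer run scan: each heading is emitted directly and each maximal run of non-heading lines is located with an inner scan and joined as one cell.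
import Mathlib
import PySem

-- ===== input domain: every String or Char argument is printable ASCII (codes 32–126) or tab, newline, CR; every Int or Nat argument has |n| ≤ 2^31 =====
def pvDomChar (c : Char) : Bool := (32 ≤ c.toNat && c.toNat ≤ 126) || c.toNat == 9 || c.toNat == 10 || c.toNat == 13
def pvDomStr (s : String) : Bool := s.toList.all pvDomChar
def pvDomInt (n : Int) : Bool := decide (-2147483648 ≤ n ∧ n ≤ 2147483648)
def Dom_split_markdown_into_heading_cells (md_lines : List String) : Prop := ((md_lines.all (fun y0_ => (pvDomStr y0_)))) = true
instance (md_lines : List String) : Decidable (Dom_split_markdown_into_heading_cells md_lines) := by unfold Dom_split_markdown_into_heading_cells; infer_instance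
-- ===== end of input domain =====

-- B replaces A's accumulate-and-flush loop by a two-pointer run scan (objective: alternative decomposition, same cost).

-- ===== PORT A =====
-- shared helper is_heading_line, used by both Pythons verbatim
def is_heading_line (line : String) : Bool :=
  let stripped := PySem.Str.lstrip line
  if !(PySem.Str.startswith stripped "#") then false
  else
    -- stripped.lstrip("#"): hand port; left-stripping the single char '#' is dropWhile (· == '#') — exact
    let after_hash : List Char := stripped.toList.dropWhile (· == '#')
    PySem.Chars.startswith after_hash [' '] || (after_hash == [])

-- one iteration of A's for-loop over state (cells, current_block)
def pvStepA (st : List String × List String) (line : String) : List String × List String :=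
  if is_heading_line line then
    ((if st.2 ≠ [] then st.1 ++ [PySem.Str.join "\n" st.2] else st.1) ++ [line], [])
  else
    (st.1, st.2 ++ [line])

def split_markdown_into_heading_cells (md_lines : List String) : List String :=
  let st := md_lines.foldl pvStepA ([], [])
  if st.2 ≠ [] then st.1 ++ [PySem.Str.join "\n" st.2] else st.1

-- ===== PORT B =====
-- B's outer while-loop: a heading advances by one; otherwise the inner while
-- scans the maximal run of non-heading lines (takeWhile/dropWhile) and joins it.
def split_markdown_into_heading_cells_alt (md_lines : List String) : List String :=
  match md_lines with
  | [] => []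
  | l :: rest =>
    if is_heading_line l then
      l :: split_markdown_into_heading_cells_alt rest
    else
      PySem.Str.join "\n" (l :: rest.takeWhile (fun x => !is_heading_line x)) ::
        split_markdown_into_heading_cells_alt (rest.dropWhile (fun x => !is_heading_line x))
termination_by md_lines.length
decreasing_by
  · simp
  · exact Nat.lt_succ_of_le (rest.length_dropWhile_le _)

-- ===== PRECONDITION & SPEC =====
def Spec_split_markdown_into_heading_cells (md_lines : List String) (out : List String) : Prop := out = split_markdown_into_heading_cells_alt md_lines
instance (md_lines : List String) (out : List String) : Decidable (Spec_split_markdown_into_heading_cells md_lines out) := by unfold Spec_split_markdown_into_heading_cells; infer_instance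

-- ===== CLAIM (what is proved, stated in full; the proofs are below) =====
def Claim_equal_split_markdown_into_heading_cells : Prop := ∀ (md_lines : List String), Dom_split_markdown_into_heading_cells md_lines → Spec_split_markdown_into_heading_cells md_lines (split_markdown_into_heading_cells md_lines)

-- ===== LEMMAS AND PROOFS =====

-- proof-only reformulation of A's remaining computation from pending block `cur`
def pvGlue (cur : List String) (lines : List String) : List String :=
  match lines with
  | [] => if cur ≠ [] then [PySem.Str.join "\n" cur] else []
  | l :: rest =>
    if is_heading_line l then
      (if cur ≠ [] then [PySem.Str.join "\n" cur] else []) ++ l :: pvGlue [] rest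
    else
      pvGlue (cur ++ [l]) rest

theorem pvFoldA_eq_glue (lines : List String) (cells cur : List String) :
    (let st := lines.foldl pvStepA (cells, cur)
     if st.2 ≠ [] then st.1 ++ [PySem.Str.join "\n" st.2] else st.1) = cells ++ pvGlue cur lines := by
  induction lines generalizing cells cur with
  | nil => simp only [List.foldl_nil, pvGlue]; split <;> simp
  | cons l rest ih =>
    simp only [List.foldl_cons, pvStepA, pvGlue]
    by_cases h : is_heading_line l = true <;> simp only [h, if_true, if_false, Bool.false_eq_true]
    · rw [ih]
      by_cases hc : cur = [] <;> simp [hc]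
    · exact ih cells (cur ++ [l])

theorem pvGlue_ne_nil (lines cur : List String) (hcur : cur ≠ []) :
    pvGlue cur lines =
      PySem.Str.join "\n" (cur ++ lines.takeWhile (fun x => !is_heading_line x)) ::
        pvGlue [] (lines.dropWhile (fun x => !is_heading_line x)) := by
  induction lines generalizing cur with
  | nil => simp [pvGlue, hcur]
  | cons l rest ih =>
    by_cases h : is_heading_line l = true
    · simp [pvGlue, h, hcur]
    · simp only [pvGlue, h, if_false, Bool.false_eq_true, List.takeWhile_cons,
        List.dropWhile_cons, Bool.not_eq_true']
      rw [ih (cur ++ [l]) (by simp)]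
      simp

theorem pvGlue_nil_eq_alt (n : ℕ) : ∀ (lines : List String), lines.length ≤ n →
    pvGlue [] lines = split_markdown_into_heading_cells_alt lines := by
  induction n with
  | zero =>
    intro lines h
    have : lines = [] := List.eq_nil_of_length_eq_zero (Nat.le_zero.mp h)
    subst this; simp [pvGlue, split_markdown_into_heading_cells_alt]
  | succ n ih =>
    intro lines h
    match lines with
    | [] => simp [pvGlue, split_markdown_into_heading_cells_alt]
    | l :: rest =>
      rw [split_markdown_into_heading_cells_alt]
      by_cases hl : is_heading_line l = true
      · simp only [pvGlue, hl, if_true]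
        rw [ih rest (Nat.le_of_succ_le_succ h)]
        simp
      · simp only [pvGlue, hl, if_false, Bool.false_eq_true, List.nil_append]
        rw [pvGlue_ne_nil rest [l] (by simp)]
        rw [ih _ (le_trans (rest.length_dropWhile_le _) (Nat.le_of_succ_le_succ h))]
        simp

-- ===== VERDICT (by name: the statement is the Claim_ definition above) =====
theorem split_markdown_into_heading_cells_spec : Claim_equal_split_markdown_into_heading_cells := by
  intro md_lines _
  unfold Spec_split_markdown_into_heading_cells split_markdown_into_heading_cells
  rw [show (([] : List String), ([] : List String)) = (([] : List String), ([] : List String)) from rfl]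
  have := pvFoldA_eq_glue md_lines [] []
  simp only at this
  rw [this, List.nil_append, pvGlue_nil_eq_alt md_lines.length md_lines le_rfl]
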